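-- pv_equiv track=rewrite | github.com/KubbyDev/MusicBox | ControlPanel/Programs/MidiToNotes/track_tools.py | process_stops
-- ===== SOURCE A (Python) =====
-- def process_stops(track, stopLength=10):
--     res = []
--     current = list(track[0])
--     for note in track[1:]:
--         if current[3] == note[3]: # Same note (same index)
--             current[1] = note[1] # Moves the note end
--             continue
--         # Different indices
--         res.append((
--             current[0],
--             current[1] - (stopLength if current[2] == note[2] else 0), # Adds an empty space if pitches are equal
--             current[2]
--         ))
--         current = list(note)
--     # Adds the last note
--     res.append((current[0], current[1], current[2]))
--     return res
-- ===== SOURCE B (Python) =====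
-- def process_stops(track, stopLength=10):
--     # Phase 1: merge each maximal run of consecutive equal-index notes into one
--     # note keeping the first note's start/pitch/index and the last note's end.
--     merged = []
--     for note in track:
--         if merged and merged[-1][3] == note[3]:
--             s, _, p, i = merged[-1]
--             merged[-1] = (s, note[1], p, i)
--         else:
--             merged.append((note[0], note[1], note[2], note[3]))
--     # Phase 2: pairwise successor pass over the merged table.
--     out = []
--     for i in range(len(merged) - 1):
--         s, e, p, _ = merged[i]
--         out.append((s, e - (stopLength if p == merged[i + 1][2] else 0), p))
--     s, e, p, _ = merged[-1]
--     out.append((s, e, p))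
--     return out
-- ===== Notes on version B (the rewrite author's own statement) =====
-- stated objective: alternative
-- what changed: Replaces A's interleaved current/lookahead single loop with two phases: first build an explicit table of merged runs (last-entry update), then a pairwise successor pass over that table emits the output.
-- outside the precondition, e.g. on process_stops([], 10): A raises IndexError, B raises IndexError
import Mathlib
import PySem

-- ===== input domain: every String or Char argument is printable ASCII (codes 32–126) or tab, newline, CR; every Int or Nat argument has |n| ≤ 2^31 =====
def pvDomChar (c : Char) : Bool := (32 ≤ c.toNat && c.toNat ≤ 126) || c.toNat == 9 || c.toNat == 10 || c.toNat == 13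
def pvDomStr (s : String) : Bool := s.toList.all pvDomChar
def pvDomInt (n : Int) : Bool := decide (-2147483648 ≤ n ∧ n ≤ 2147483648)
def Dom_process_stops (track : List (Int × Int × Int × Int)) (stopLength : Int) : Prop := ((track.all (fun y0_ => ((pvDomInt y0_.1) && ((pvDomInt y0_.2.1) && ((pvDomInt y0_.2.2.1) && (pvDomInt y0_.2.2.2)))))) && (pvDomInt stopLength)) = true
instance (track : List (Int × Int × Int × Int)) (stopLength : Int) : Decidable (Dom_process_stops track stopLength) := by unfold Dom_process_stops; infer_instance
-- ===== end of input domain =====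

-- B is a two-phase decomposition (explicit merged-run table, then a pairwise pass),
-- equal in cost to A's single interleaved loop; objective: alternative.

-- ===== PORT A =====
-- A's for-loop over track[1:] with state (res, current); branches in source order.
def psLoopA (stopLength : Int) : List (Int × Int × Int) → (Int × Int × Int × Int) → List (Int × Int × Int × Int) → List (Int × Int × Int)
  | res, cur, [] => res ++ [(cur.1, cur.2.1, cur.2.2.1)]
  | res, cur, note :: rest =>
    if cur.2.2.2 = note.2.2.2 then
      psLoopA stopLength res (cur.1, note.2.1, cur.2.2.1, cur.2.2.2) rest
    else
      psLoopA stopLength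
        (res ++ [(cur.1, cur.2.1 - (if cur.2.2.1 = note.2.2.1 then stopLength else 0), cur.2.2.1)])
        note rest

def process_stops (track : List (Int × Int × Int × Int)) (stopLength : Int) : List (Int × Int × Int) :=
  match track with
  | [] => []  -- Python: track[0] raises IndexError; excluded by Pre_
  | n :: rest => psLoopA stopLength [] n rest

-- ===== PORT B =====
-- Phase 1 of Source B: the merged table is built by appending or updating its LAST
-- entry; here the accumulator holds the table reversed, so that update is a
-- head update and append is cons (the final .reverse restores Source B's order).
def psMergeStep (acc : List (Int × Int × Int × Int)) (note : Int × Int × Int × Int) : List (Int × Int × Int × Int) :=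
  match acc with
  | m :: rest => if m.2.2.2 = note.2.2.2 then (m.1, note.2.1, m.2.2.1, m.2.2.2) :: rest else note :: m :: rest
  | [] => [note]

-- Phase 2 of Source B: the index loop over consecutive pairs of `merged` plus the
-- final lone entry, as structural recursion on the list of pairs.
def psEmit (stopLength : Int) : List (Int × Int × Int × Int) → List (Int × Int × Int)
  | [] => []
  | [m] => [(m.1, m.2.1, m.2.2.1)]
  | a :: b :: rest =>
      (a.1, a.2.1 - (if a.2.2.1 = b.2.2.1 then stopLength else 0), a.2.2.1) :: psEmit stopLength (b :: rest)

def process_stops_alt (track : List (Int × Int × Int × Int)) (stopLength : Int) : List (Int × Int × Int) :=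
  psEmit stopLength ((track.foldl psMergeStep []).reverse)

-- ===== PRECONDITION & SPEC =====
-- Pre_ excludes only the empty track, on which both A and B raise IndexError.
def Pre_process_stops (track : List (Int × Int × Int × Int)) (stopLength : Int) : Prop := track ≠ []
instance (track : List (Int × Int × Int × Int)) (stopLength : Int) : Decidable (Pre_process_stops track stopLength) := by unfold Pre_process_stops; infer_instance
def pvWitness_process_stops : (List (Int × Int × Int × Int)) × Int := ([(0, 4, 60, 1), (5, 9, 60, 2)], 10)
def Spec_process_stops (track : List (Int × Int × Int × Int)) (stopLength : Int) (out : List (Int × Int × Int)) : Prop := out = process_stops_alt track stopLength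
instance (track : List (Int × Int × Int × Int)) (stopLength : Int) (out : List (Int × Int × Int)) : Decidable (Spec_process_stops track stopLength out) := by unfold Spec_process_stops; infer_instance

-- ===== CLAIM (what is proved, stated in full; the proofs are below) =====
def Claim_equal_process_stops : Prop := ∀ (track : List (Int × Int × Int × Int)) (stopLength : Int), Dom_process_stops track stopLength → Pre_process_stops track stopLength → Spec_process_stops track stopLength (process_stops track stopLength)

-- ===== LEMMAS AND PROOFS =====

-- Folding psMergeStep never touches entries below the current head: the
-- accumulator's tail is carried along unchanged.
lemma psMerge_acc : ∀ (rest : List (Int × Int × Int × Int)) (cur : Int × Int × Int × Int)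
    (acc0 : List (Int × Int × Int × Int)),
    (List.foldl psMergeStep (cur :: acc0) rest).reverse
      = acc0.reverse ++ (List.foldl psMergeStep [cur] rest).reverse := by
  intro rest
  induction rest with
  | nil => intro cur acc0; simp
  | cons note rest ih =>
    intro cur acc0
    simp only [List.foldl_cons, psMergeStep]
    by_cases h : cur.2.2.2 = note.2.2.2
    · simp only [if_pos h]; exact ih _ acc0
    · simp only [if_neg h]
      rw [ih note (cur :: acc0), ih note [cur]]
      simp

-- The first merged run keeps the first note's start, pitch and index.
lemma psMerge_head : ∀ (rest : List (Int × Int × Int × Int)) (cur : Int × Int × Int × Int),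
    ∃ e t, (List.foldl psMergeStep [cur] rest).reverse = (cur.1, e, cur.2.2.1, cur.2.2.2) :: t := by
  intro rest
  induction rest with
  | nil => intro cur; exact ⟨cur.2.1, [], by simp⟩
  | cons note rest ih =>
    intro cur
    simp only [List.foldl_cons, psMergeStep]
    by_cases h : cur.2.2.2 = note.2.2.2
    · simp only [if_pos h]
      exact ih (cur.1, note.2.1, cur.2.2.1, cur.2.2.2)
    · simp only [if_neg h]
      exact ⟨cur.2.1, (List.foldl psMergeStep [note] rest).reverse,
        by rw [psMerge_acc rest note [cur]]; simp⟩

-- Loop invariant: A's loop from state (res, cur) produces res followed by B's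
-- two phases applied to cur :: rest.
lemma psLoopA_eq : ∀ (rest : List (Int × Int × Int × Int)) (cur : Int × Int × Int × Int)
    (res : List (Int × Int × Int)) (sl : Int),
    psLoopA sl res cur rest = res ++ psEmit sl ((List.foldl psMergeStep [cur] rest).reverse) := by
  intro rest
  induction rest with
  | nil => intro cur res sl; simp [psLoopA, psEmit]
  | cons note rest ih =>
    intro cur res sl
    simp only [psLoopA, List.foldl_cons, psMergeStep]
    by_cases h : cur.2.2.2 = note.2.2.2
    · simp only [if_pos h]; exact ih _ res sl
    · simp only [if_neg h]
      rw [ih note _ sl, psMerge_acc rest note [cur]]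
      obtain ⟨e, t, ht⟩ := psMerge_head rest note
      rw [ht]
      simp [psEmit, List.append_assoc]

-- ===== VERDICT (by name: the statement is the Claim_ definition above) =====
theorem process_stops_spec : Claim_equal_process_stops := by
  intro track sl _ hpre
  cases track with
  | nil => exact absurd rfl hpre
  | cons n rest =>
    show process_stops (n :: rest) sl = process_stops_alt (n :: rest) sl
    simp only [process_stops, process_stops_alt, List.foldl_cons, psMergeStep]
    rw [psLoopA_eq]
    simp
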